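-- pv_equiv track=rewrite | github.com/aelirift/rayxiv3 | src/rayxi/api/routes/game_test.py | _pick_gameplay_scene
-- ===== SOURCE A (Python) =====
-- _GAMEPLAY_SCENE_KEYWORDS = ("fight", "battle", "combat", "gameplay", "match", "play", "race", "racing", "track")
--
-- def _pick_gameplay_scene(scene_names: list[str]) -> str | None:
--     # Prefer exact gameplay-style names over intro/transition scenes
--     priority = ["fighting", "racing", "race", "gameplay", "battle", "match", "play"]
--     for p in priority:
--         for name in scene_names:
--             if name.lower() == p:
--                 return name
--     for name in scene_names:
--         lower = name.lower()
--         if (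
--             any(kw in lower for kw in _GAMEPLAY_SCENE_KEYWORDS)
--             and "intro" not in lower
--             and "select" not in lower
--             and "menu" not in lower
--         ):
--             return name
--     return None
-- ===== SOURCE B (Python) =====
-- _GAMEPLAY_SCENE_KEYWORDS = ("fight", "battle", "combat", "gameplay", "match", "play", "race", "racing", "track")
--
-- _PRIORITY = ["fighting", "racing", "race", "gameplay", "battle", "match", "play"]
--
--
-- def _rank(name):
--     """Smaller = better: priority index if the lowered name is a priority word,
--     len(_PRIORITY) if it merely looks like gameplay, None if unusable."""
--     lower = name.lower()
--     try:
--         return _PRIORITY.index(lower)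
--     except ValueError:
--         pass
--     if (
--         any(kw in lower for kw in _GAMEPLAY_SCENE_KEYWORDS)
--         and "intro" not in lower
--         and "select" not in lower
--         and "menu" not in lower
--     ):
--         return len(_PRIORITY)
--     return None
--
--
-- def _pick_gameplay_scene(scene_names):
--     # Single pass: keep the first name achieving the smallest rank.
--     best = None  # (rank, name)
--     for name in scene_names:
--         r = _rank(name)
--         if r is not None and (best is None or r < best[0]):
--             best = (r, name)
--     return best[1] if best is not None else None
-- ===== Notes on version B (the rewrite author's own statement) =====
-- stated objective: alternative
-- what changed: A's staged searches (a priority-major nested scan followed by a separate keyword-fallback scan) are replaced by a single pass over scene_names that assigns each name a numeric rank (priority index, len(priority) for keyword-only gameplay names, None otherwise) and keeps the first name achieving the smallest rank.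
import Mathlib
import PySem

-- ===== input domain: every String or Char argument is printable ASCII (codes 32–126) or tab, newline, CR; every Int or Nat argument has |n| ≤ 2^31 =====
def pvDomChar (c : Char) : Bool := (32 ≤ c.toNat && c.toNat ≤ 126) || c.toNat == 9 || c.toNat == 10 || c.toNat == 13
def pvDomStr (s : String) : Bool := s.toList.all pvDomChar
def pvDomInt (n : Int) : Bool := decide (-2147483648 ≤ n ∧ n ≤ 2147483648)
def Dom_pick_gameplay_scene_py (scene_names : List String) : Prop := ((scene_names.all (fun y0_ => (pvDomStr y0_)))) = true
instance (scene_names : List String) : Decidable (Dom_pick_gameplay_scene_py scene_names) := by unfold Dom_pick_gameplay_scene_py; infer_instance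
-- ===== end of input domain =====

-- B replaces A's staged searches (priority-major nested scan, then a fallback scan) by a SINGLE pass
-- over scene_names keeping the first name of smallest numeric rank. Objective: alternative (one pass).

-- ===== PORT A =====
def pvKeywords : List String :=
  ["fight", "battle", "combat", "gameplay", "match", "play", "race", "racing", "track"]

def pvPriority : List String :=
  ["fighting", "racing", "race", "gameplay", "battle", "match", "play"]

-- outer loop 'for p in priority' with inner scan 'for name in scene_names: if name.lower() == p: return name'
def pickA_prio (scene_names : List String) : List String → Option String
  | [] => none
  | p :: ps =>
    match scene_names.find? (fun name => PySem.Str.lower name == p) with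
    | some name => some name
    | none => pickA_prio scene_names ps

-- fallback loop 'for name in scene_names: …'
def pickA_kw : List String → Option String
  | [] => none
  | name :: rest =>
    let lower := PySem.Str.lower name
    if pvKeywords.any (fun kw => PySem.Str.isIn kw lower)
        && !PySem.Str.isIn "intro" lower
        && !PySem.Str.isIn "select" lower
        && !PySem.Str.isIn "menu" lower
    then some name
    else pickA_kw rest

def pick_gameplay_scene_py (scene_names : List String) : Option String :=
  match pickA_prio scene_names pvPriority with
  | some name => some name
  | none => pickA_kw scene_names

-- ===== PORT B =====
-- _rank(name): priority index of the lowered name, len(priority) if it looks like gameplay, else None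
def rankB (name : String) : Option Nat :=
  match PySem.List.index? pvPriority (PySem.Str.lower name) with
  | some i => some i
  | none =>
    if pvKeywords.any (fun kw => PySem.Str.isIn kw (PySem.Str.lower name))
        && !PySem.Str.isIn "intro" (PySem.Str.lower name)
        && !PySem.Str.isIn "select" (PySem.Str.lower name)
        && !PySem.Str.isIn "menu" (PySem.Str.lower name)
    then some pvPriority.length
    else none

-- loop body: keep the first name achieving the smallest rank
def stepB (best : Option (Nat × String)) (name : String) : Option (Nat × String) :=
  match rankB name with
  | none => best
  | some r =>
    match best with
    | none => some (r, name)
    | some (br, bn) => if r < br then some (r, name) else some (br, bn)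

def pick_gameplay_scene_py_alt (scene_names : List String) : Option String :=
  (scene_names.foldl stepB none).map Prod.snd

-- ===== PRECONDITION & SPEC =====
def Spec_pick_gameplay_scene_py (scene_names : List String) (out : Option String) : Prop := out = pick_gameplay_scene_py_alt scene_names
instance (scene_names : List String) (out : Option String) : Decidable (Spec_pick_gameplay_scene_py scene_names out) := by unfold Spec_pick_gameplay_scene_py; infer_instance

-- ===== CLAIM (what is proved, stated in full; the proofs are below) =====
def Claim_equal_pick_gameplay_scene_py : Prop := ∀ (scene_names : List String), Dom_pick_gameplay_scene_py scene_names → Spec_pick_gameplay_scene_py scene_names (pick_gameplay_scene_py scene_names)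

-- ===== LEMMAS AND PROOFS =====

-- staged search: first stage i (in order) whose rank-i scan of ns succeeds
def Csearch (ns : List String) : List Nat → Option String
  | [] => none
  | i :: is =>
    match ns.find? (fun n => rankB n == some i) with
    | some x => some x
    | none => Csearch ns is

theorem Csearch_nil (stl : List Nat) : Csearch [] stl = none := by
  induction stl with
  | nil => rfl
  | cons i is ih => simpa [Csearch] using ih

theorem Csearch_append (ns : List String) (l1 l2 : List Nat) :
    Csearch ns (l1 ++ l2) =
      match Csearch ns l1 with
      | some x => some x
      | none => Csearch ns l2 := by
  induction l1 with
  | nil => simp [Csearch]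
  | cons i is ih =>
    simp only [List.cons_append, Csearch, ih]
    cases ns.find? (fun n => rankB n == some i) <;> rfl

theorem Csearch_skip (n : String) (ns : List String) (stl : List Nat)
    (h : ∀ i ∈ stl, (rankB n == some i) = false) :
    Csearch (n :: ns) stl = Csearch ns stl := by
  induction stl with
  | nil => rfl
  | cons i is ih =>
    have h1 : (rankB n == some i) = false := h i (by simp)
    simp only [Csearch, List.find?_cons, h1]
    rw [ih (fun j hj => h j (by simp [hj]))]

theorem index?_lt_length {xs : List String} {v : String} {k : Nat}
    (h : PySem.List.index? xs v = some k) : k < xs.length := by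
  obtain ⟨hk, _, _⟩ := PySem.List.getElem_of_index?_eq_some h
  exact hk

theorem pvPriority_length : pvPriority.length = 7 := rfl

theorem rank_lt (n : String) (r : Nat) (h : rankB n = some r) : r < 8 := by
  unfold rankB at h
  rcases hidx : PySem.List.index? pvPriority (PySem.Str.lower n) with _ | j
  all_goals rw [hidx] at h
  · split at h <;> simp_all [pvPriority_length] <;> omega
  · have hlen := index?_lt_length hidx
    rw [pvPriority_length] at hlen
    split at h <;> simp_all
    omega

theorem Csearch_main (n : String) (ns : List String) (r b : Nat)
    (hr : rankB n = some r) (hb : r < b) :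
    Csearch (n :: ns) (List.range b) = some ((Csearch ns (List.range r)).getD n) := by
  obtain ⟨tail, hsplit⟩ : ∃ tail, List.range b = List.range r ++ (r :: tail) := by
    have hb' : b = (r + 1) + (b - (r+1)) := by omega
    refine ⟨(List.range (b - (r+1))).map (fun x => r + 1 + x), ?_⟩
    conv_lhs => rw [hb', List.range_add, List.range_succ]
    simp
  rw [hsplit, Csearch_append]
  have hskip : Csearch (n :: ns) (List.range r) = Csearch ns (List.range r) := by
    apply Csearch_skip
    intro i hi
    have : i < r := List.mem_range.mp hi
    simp [hr]; omega
  rw [hskip]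
  have hstage : Csearch (n :: ns) (r :: tail) = some n := by
    simp [Csearch, hr]
  cases hcs : Csearch ns (List.range r) with
  | some x => simp
  | none => simpa using hstage

theorem foldB_some (ns : List String) : ∀ (br : Nat) (bn : String),
    (ns.foldl stepB (some (br, bn))).map Prod.snd = some ((Csearch ns (List.range br)).getD bn) := by
  induction ns with
  | nil => intro br bn; simp [Csearch_nil]
  | cons n ns ih =>
    intro br bn
    rcases hr : rankB n with _ | r
    · have hstep : stepB (some (br, bn)) n = some (br, bn) := by simp [stepB, hr]
      rw [List.foldl_cons, hstep, ih]
      rw [Csearch_skip n ns _ (fun i _ => by simp [hr])]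
    · by_cases hlt : r < br
      · have hstep : stepB (some (br, bn)) n = some (r, n) := by simp [stepB, hr, hlt]
        rw [List.foldl_cons, hstep, ih]
        rw [Csearch_main n ns r br hr hlt]
        simp
      · have hstep : stepB (some (br, bn)) n = some (br, bn) := by simp [stepB, hr, hlt]
        rw [List.foldl_cons, hstep, ih]
        rw [Csearch_skip n ns _ (fun i hi => by
          have : i < br := List.mem_range.mp hi
          simp [hr]; omega)]

theorem foldB_none (ns : List String) :
    (ns.foldl stepB none).map Prod.snd = Csearch ns (List.range 8) := by
  induction ns with
  | nil => simp [Csearch_nil]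
  | cons n ns ih =>
    rcases hr : rankB n with _ | r
    · have hstep : stepB none n = none := by simp [stepB, hr]
      rw [List.foldl_cons, hstep, ih]
      rw [Csearch_skip n ns _ (fun i _ => by simp [hr])]
    · have hstep : stepB none n = some (r, n) := by simp [stepB, hr]
      rw [List.foldl_cons, hstep, foldB_some]
      rw [Csearch_main n ns r 8 hr (rank_lt n r hr)]

theorem pvPriority_nodup : pvPriority.Nodup := by decide

-- the stage-i predicate of the staged search coincides pointwise with A's stage-i comparison
theorem rank_stage_eq (n : String) (i : Nat) (hi : i < pvPriority.length) :
    (rankB n == some i) = (PySem.Str.lower n == pvPriority[i]) := by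
  unfold rankB
  rcases hidx : PySem.List.index? pvPriority (PySem.Str.lower n) with _ | j
  · have hnotmem : PySem.Str.lower n ∉ pvPriority := (PySem.List.index?_eq_none_iff _ _).mp hidx
    have hne : PySem.Str.lower n ≠ pvPriority[i] := by
      intro he; exact hnotmem (he ▸ List.getElem_mem hi)
    have hlen : i < pvPriority.length := hi
    simp only []
    split
    · simp [hne]
      omega
    · simp [hne]
  · obtain ⟨hj, hje, hfirst⟩ := PySem.List.getElem_of_index?_eq_some hidx
    simp only []
    by_cases hji : j = i
    · subst hji
      simp [hje.symm]
    · have hne : PySem.Str.lower n ≠ pvPriority[i] := by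
        intro he
        rcases Nat.lt_or_ge i j with hij | hij
        · exact hfirst i hij he.symm
        · have hij' : j < i := by omega
          exact hji (List.Nodup.getElem_inj_iff pvPriority_nodup |>.mp (hje.trans he) )
      simp [hne, hji]

theorem find?_congr_mem {α : Type} (p q : α → Bool) (l : List α)
    (h : ∀ a ∈ l, p a = q a) : l.find? p = l.find? q := by
  induction l with
  | nil => rfl
  | cons a l ih =>
    have h1 := h a (by simp)
    simp only [List.find?_cons, h1]
    cases q a
    · exact ih (fun b hb => h b (by simp [hb]))
    · rfl

theorem A_prio_eq (ns : List String) :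
    pickA_prio ns pvPriority = Csearch ns (List.range 7) := by
  have e : ∀ i (hi : i < pvPriority.length),
      ns.find? (fun n => rankB n == some i) = ns.find? (fun n => PySem.Str.lower n == pvPriority[i]) :=
    fun i hi => find?_congr_mem _ _ ns (fun n _ => rank_stage_eq n i hi)
  have e0 : ns.find? (fun n => rankB n == some 0) = ns.find? (fun n => PySem.Str.lower n == "fighting") := by simpa using e 0 (by decide)
  have e1 : ns.find? (fun n => rankB n == some 1) = ns.find? (fun n => PySem.Str.lower n == "racing") := by simpa using e 1 (by decide)
  have e2 : ns.find? (fun n => rankB n == some 2) = ns.find? (fun n => PySem.Str.lower n == "race") := by simpa using e 2 (by decide)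
  have e3 : ns.find? (fun n => rankB n == some 3) = ns.find? (fun n => PySem.Str.lower n == "gameplay") := by simpa using e 3 (by decide)
  have e4 : ns.find? (fun n => rankB n == some 4) = ns.find? (fun n => PySem.Str.lower n == "battle") := by simpa using e 4 (by decide)
  have e5 : ns.find? (fun n => rankB n == some 5) = ns.find? (fun n => PySem.Str.lower n == "match") := by simpa using e 5 (by decide)
  have e6 : ns.find? (fun n => rankB n == some 6) = ns.find? (fun n => PySem.Str.lower n == "play") := by simpa using e 6 (by decide)
  show pickA_prio ns pvPriority = Csearch ns [0,1,2,3,4,5,6]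
  simp only [pvPriority, pickA_prio, Csearch, e0, e1, e2, e3, e4, e5, e6]

theorem isGameplayA_eq (n : String)
    (hidx : PySem.List.index? pvPriority (PySem.Str.lower n) = none) :
    (rankB n == some 7) =
      (pvKeywords.any (fun kw => PySem.Str.isIn kw (PySem.Str.lower n))
        && !PySem.Str.isIn "intro" (PySem.Str.lower n)
        && !PySem.Str.isIn "select" (PySem.Str.lower n)
        && !PySem.Str.isIn "menu" (PySem.Str.lower n)) := by
  cases hcond : (pvKeywords.any (fun kw => PySem.Str.isIn kw (PySem.Str.lower n))
        && !PySem.Str.isIn "intro" (PySem.Str.lower n)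
        && !PySem.Str.isIn "select" (PySem.Str.lower n)
        && !PySem.Str.isIn "menu" (PySem.Str.lower n)) <;>
    simp only [rankB, hidx, hcond] <;> simp [pvPriority_length]

theorem pickA_kw_eq_find (ns : List String) :
    pickA_kw ns = ns.find? (fun n =>
      pvKeywords.any (fun kw => PySem.Str.isIn kw (PySem.Str.lower n))
        && !PySem.Str.isIn "intro" (PySem.Str.lower n)
        && !PySem.Str.isIn "select" (PySem.Str.lower n)
        && !PySem.Str.isIn "menu" (PySem.Str.lower n)) := by
  induction ns with
  | nil => rfl
  | cons n ns ih =>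
    simp only [pickA_kw, List.find?_cons]
    cases hc : (pvKeywords.any (fun kw => PySem.Str.isIn kw (PySem.Str.lower n))
        && !PySem.Str.isIn "intro" (PySem.Str.lower n)
        && !PySem.Str.isIn "select" (PySem.Str.lower n)
        && !PySem.Str.isIn "menu" (PySem.Str.lower n))
    · simp only [hc]
      simpa using ih
    · simp only [hc]
      simp

theorem Csearch_none_stage (ns : List String) (stl : List Nat)
    (h : Csearch ns stl = none) : ∀ i ∈ stl, ns.find? (fun n => rankB n == some i) = none := by
  induction stl with
  | nil => intro i hi; cases hi
  | cons j js ih =>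
    intro i hi
    unfold Csearch at h
    rcases hf : ns.find? (fun n => rankB n == some j) with _ | x
    · rw [hf] at h
      rcases List.mem_cons.mp hi with he | hm
      · exact he ▸ hf
      · exact ih h i hm
    · rw [hf] at h; cases h

-- ===== VERDICT (by name: the statement is the Claim_ definition above) =====
theorem pick_gameplay_scene_py_spec : Claim_equal_pick_gameplay_scene_py := by
  intro ns _
  unfold Spec_pick_gameplay_scene_py pick_gameplay_scene_py pick_gameplay_scene_py_alt
  rw [foldB_none]
  have h8 : List.range 8 = List.range 7 ++ [7] := by decide
  rw [h8, Csearch_append, ← A_prio_eq]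
  cases hp : pickA_prio ns pvPriority with
  | some x => rfl
  | none =>
    -- every priority stage failed: no name's lowered form is in pvPriority
    have hstages := Csearch_none_stage ns (List.range 7) (by rw [← A_prio_eq, hp])
    have hnom : ∀ n ∈ ns, PySem.List.index? pvPriority (PySem.Str.lower n) = none := by
      intro n hn
      rcases hidx : PySem.List.index? pvPriority (PySem.Str.lower n) with _ | j
      · rfl
      · have hj7 : j < 7 := by
          have := index?_lt_length hidx
          rwa [pvPriority_length] at this
        have hmem := List.find?_eq_none.mp (hstages j (List.mem_range.mpr hj7)) n hn
        have hrk : rankB n = some j := by simp only [rankB, hidx]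
        simp [hrk] at hmem
    have hfind := find?_congr_mem _ _ ns (fun n hn => isGameplayA_eq n (hnom n hn))
    show pickA_kw ns = Csearch ns [7]
    rw [pickA_kw_eq_find, ← hfind]
    cases hf : ns.find? (fun n => rankB n == some 7) <;> simp [Csearch, hf]
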